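/- GENERATED by mk_final_copies.py from the proof of the farm's unit `start_decoder.C3b` (farm:start_decoder.C3b.1: Lemmas.lean) as the
   re-elaboration sweep compiled it — do not edit. -/
import Asan.CheckWalk
import Vorbis.Spec.StartDecoderATest
import Vorbis.Spec.Units.start_decoder_C3b

/-!
  LEMMAS of the unit `start_decoder.C3b` (one round of loop 3776), on the names of the tree: `C3.Inv`, `C3.Inv.carry`, `C3.step_of_call`,
  `C3.stepWins` of Vorbis/Spec/StartDecoderC3.lean. Started from farm/hints/start_decoder.C3b.head-start.lean (H-11: the first four stretches);
  every stretch goes from `C3.Inv` at a label to `C3.Inv` at the next label and hands on the loop registers and `entries` UNCHANGED: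

      c3b_site_entries   the `Site` of `c->entries` (both check sites 0x11453a, 0x11456e)
      c3b_stack_only     a callee that writes only its stack: `SameExcept [⟨R − 408, R⟩]`;  c3b_bits_stack : `Bits` over it
      c3b_err_exit       PURE: `C3.Inv` at the return of `error` + a state at 0x113b22 with `rax = 0`  ⇒  `AtERR`
      c3b_step_eqs       PURE: over a step inside `C3.stepWins` the book's address, `entries`, `codeword_lengths` read the same
      c3b_head           0x114536 → 0x11453f   (check 0x11453a)                                  loop8  → ret137
      c3b_test           0x11453f → 0x114590 (exit: `C3.Inv` with `ce = entries`, = `AtC3X`'s body) ∨ 0x114550 (ilog returned, `eax ≤ 25`)   ret137 → at_114590 ∨ ret138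
      c3b_getn           0x114550 → 0x11455c   (`n = get_bits(f, ilog)`, `n < 2^25`)             ret138 → ret139
      c3b_len            0x11455c → `AtERR` (stub 0x114507, `current_length ≥ 32`) ∨ 0x114573 (check 0x11456e; `r13d = n`, `r15d = ce + n`, `r12 ≤ 31`)   ret139 → cut4 ∨ ret140
      c3b_cmp_le         PURE: the signed compare at 0x114573 is the compare of the numbers (`entries < 2^24`, `n < 2^25`)
      c3b_fill           0x114573 → `AtERR` (stub 0x114579, `ce + n > entries`) ∨ 0x11452f (memset returned, the filled prefix is `ce + n`)   ret140 → cut4 ∨ ret136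
      c3b_back           0x11452f → 0x114536   (`add r12d,1 ; mov ebp,r15d`)                     ret136 → loop8

  The composition into `SegC3b` (`ReachVia.trans` + `rcases`) is `segC3b_walk` of Proof.lean.
-/

namespace Vorbis.Spec.start_decoder_C3b
open X86 X86.User Asan Vorbis Vorbis.Spec Vorbis.Spec.StartDecoder

set_option maxRecDepth 16000

/-- **The check site of `c->entries`** (0x11453a and 0x11456e: 4 bytes at `c + 4`, `c = codebooks + 2120·i`): inside the codebooks block
(`CodebooksOK` over the function's block predicate: `SDw.cb0`), which is live (`Env.live`). -/
theorem c3b_site_entries {u₀ : State} {g : Ghost} {i : Nat} {A2 A3 Ai : Arena} {A : Arena × List Obj} {pc : Word} {ce : Nat} {v : State}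
    (hI : C3.Inv u₀ g i A2 A3 Ai A pc ce v) :
    Site (Live (stackObjs g.frames' ++ A.2)) (g.cb v.mem i + 4) 4 := by
  rcases (hI.cur.sd.cb0 (by omega)).1 with h0 | hok
  · exact absurd h0 (hI.cur.sd.cb0 (by omega)).2
  · exact hok.site_cb_field hI.cur.sd.env.live i hI.cur.lt 4 4 (by decide) (by decide) rfl

/-- **A callee that writes only its own stack** (ilog; the check routines): the push of the return address and the callee's footprint
`ws` (inside `[R − 408, R)`) leave everything but that one window alone — in particular the bytes of `*f` that `Bits` reads. -/
theorem c3b_stack_only {R : Nat} {m mc mr : Mem} {sp : Word} {ra : Nat} {ws : List Span}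
    (hsp : sp.toNat = R) (hR : 408 ≤ R) (hR64 : R < 2 ^ 64)
    (hmem : mc = m.writeLE (sp - 8) 8 ra) (hsame : Mem.SameExcept ws mc mr)
    (hws : ∀ w, w ∈ ws → R - 408 ≤ w.lo ∧ w.hi ≤ R) :
    Mem.SameExcept [⟨R - 408, R⟩] m mr := by
  have e8 : (sp - 8).toNat = R - 8 := by
    have : (8 : Word).toNat = 8 := rfl
    rw [UInt64.toNat_sub_of_le _ _ (by rw [UInt64.le_iff_toNat_le, this]; omega), this, hsp]
  have hpush : Mem.SameExcept [⟨R - 408, R⟩] m mc := by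
    rw [hmem]
    apply Mem.SameExcept.writeLE _ m (sp - 8) 8 ra (by omega)
    refine ⟨⟨R - 408, R⟩, List.mem_cons_self, ?_, ?_⟩
    · simp only []
      omega
    · simp only []
      omega
  apply hpush.step_same hsame
  intro w hw a ha1 ha2
  have hc := hws w hw
  exact ⟨_, List.mem_cons_self, by simp only []; omega, by simp only []; omega⟩

/-- `Bits` over a change of memory confined to the stack below `R` (`*f` lies outside `[R − 408, R)`: `C3.Where`). -/
theorem c3b_bits_stack {Blk : Block → Prop} {len R RA f : Nat} {m mr : Mem} (hb : Bits Blk len m f)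
    (hs : Mem.SameExcept [⟨R - 408, R⟩] m mr) (hRA : R + 1480 = RA)
    (hf : RA + 8 ≤ f ∨ f + 1808 ≤ 0x700000 ∨ 0x800000 ≤ f) (hlo : 0x700000 + 1888 ≤ RA) (hhi : RA + 8 ≤ 0x800000) :
    Bits Blk len mr f := by
  apply hb.frame_fields
  apply Bits.SameFields.of_sameExcept hs
  all_goals
    intro w hw
    simp only [List.mem_cons, List.mem_nil_iff, or_false] at hw
    subst hw
    simp only []
    omega

/-- **The error exit, pure part**: from the invariant at the state `s` the call of `error` returned to, and a state `w` at the epilogue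
0x113b22 with the same memory, stack pointer, r14, rbx and `rax = 0`: `AtERR` (`Cur.failed` gives SD.ERR). -/
theorem c3b_err_exit {u₀ : State} {g : Ghost} {i : Nat} {A2 A3 Ai : Arena} {A : Arena × List Obj} {pc : Word} {ce : Nat}
    {s w : State} (hI : C3.Inv u₀ g i A2 A3 Ai A pc ce s)
    (hrip : w.rip = pc_ERR) (hrsp : w.reg .rsp = s.reg .rsp) (hr14 : w.reg .r14 = s.reg .r14)
    (hrbx : w.reg .rbx = s.reg .rbx) (hinv : abiInv w) (hmem : w.mem = s.mem) (hrax : w.reg .rax = 0) :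
    AtERR u₀ g w := by
  have hI0 : C3.Inv u₀ g i A2 A3 Ai A pc 0 s := { hI with filled := fun j hj => absurd hj (Nat.not_lt_zero j) }
  have hs : Mem.SameExcept (C3.stepWins g.R g.f (Codebook.codeword_lengths s.mem (g.cb s.mem i)) 0 0) s.mem w.mem := by
    rw [hmem]
    exact Mem.SameExcept.refl _ _
  have hbits : Bits (g.Blk A) g.len w.mem g.f := by
    rw [hmem]
    exact hI.cur.sd.bits
  have hIr := hI0.carry (pc' := pc_ERR) hrip hrsp hr14 hrbx hinv hs (Nat.le_refl _) (Nat.le_refl _) (Nat.zero_le _) hbits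
  refine ⟨A, { frame := hIr.frame, hand := hIr.cur.hand, result := Or.inl ⟨?_, hIr.cur.failed⟩ }⟩
  rw [hrax]
  rfl

/-- **What a step of the segment leaves alone in the book**: over a change of memory inside `C3.stepWins` (the hypotheses of
`C3.Inv.carry`) the address of the current codebook, its `entries` and its `codeword_lengths` read the same. -/
theorem c3b_step_eqs {u₀ : State} {g : Ghost} {i : Nat} {A2 A3 Ai : Arena} {A : Arena × List Obj} {pc : Word} {ce lo hi : Nat}
    {s : State} {m' : Mem} (h : C3.Inv u₀ g i A2 A3 Ai A pc ce s)
    (hs : Mem.SameExcept (C3.stepWins g.R g.f (Codebook.codeword_lengths s.mem (g.cb s.mem i)) lo hi) s.mem m')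
    (_hlh : lo ≤ hi) (hhi : hi ≤ (Codebook.entries s.mem (g.cb s.mem i)).toNat) :
    g.cb m' i = g.cb s.mem i ∧
      Codebook.entries m' (g.cb s.mem i) = Codebook.entries s.mem (g.cb s.mem i) ∧
      Codebook.codeword_lengths m' (g.cb s.mem i) = Codebook.codeword_lengths s.mem (g.cb s.mem i) := by
  have hw := h.where_
  have ha := h.cur.sd.arena
  have hcb := h.cur.ages.cbOK
  have hlen0 := h.lengths
  have hlt := h.cur.lt
  have hexti := h.cur.ages.exti
  generalize hcl : Codebook.codeword_lengths s.mem (g.cb s.mem i) = cl at hw hs hlen0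
  generalize hE : (Codebook.entries s.mem (g.cb s.mem i)).toNat = E at hw hhi hlen0
  obtain ⟨q1, q2, q3, q4, q5, q6, q7, q8, q9, q10, q11, q12, q13, q14, q15, q16⟩ := hw
  have he : ObjEq C3.sdWins s.mem g.f m' g.f := by
    apply ObjEq.of_sameExcept hs
    · intro w hw
      simp only [C3.sdWins, List.mem_cons, List.mem_nil_iff, or_false] at hw
      rcases hw with rfl | rfl | rfl | rfl | rfl | rfl <;> simp only [] <;> omega
    · intro w hw sp hsp
      have := C3.stepWins_cases hsp
      simp only [C3.sdWins, List.mem_cons, List.mem_nil_iff, or_false] at hw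
      rcases hw with rfl | rfl | rfl | rfl | rfl | rfl <;> simp only [] <;> omega
  have hk : AllKept Ai.Blk s.mem m' := by
    intro B hB
    have hBA : A.1.Blk B := hB.mono hexti
    have hin := arena_inside ha hBA
    have hoff := ha.blk_off_stack hBA
    have hd := ha.old_disjoint_since hexti hB hlen0
    simp only [vblock] at hd
    apply Block.Kept.of_sameExcept hs
    · intro w hw
      have := C3.stepWins_cases hw
      omega
    · exact ha.blkOK.no_wrap hBA
  have ecbs : stb_vorbis.codebooks m' g.f = stb_vorbis.codebooks s.mem g.f := by
    simp only [vacc, voff]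
    exact he.u64 168 (by decide)
  have ecb : g.cb m' i = g.cb s.mem i := by
    unfold Ghost.cb
    simp only [stb_vorbis.codebooks_at]
    rw [ecbs]
  have hkcbs := hk _ hcb.F2
  have hkc : (Codebook.block (g.cb s.mem i)).Kept s.mem m' := hcb.cb_kept hkcbs i hlt
  have hsf := Codebook.SameFields.of_kept hkc
  exact ⟨ecb, hsf.entries, hsf.codeword_lengths.trans hcl⟩

set_option maxHeartbeats 4000000 in
/-- **The first basic block of a round** (0x114536 `lea rdi,[r14+4]`, 0x11453a `call __asan_load4_noabort`): the machine reaches the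
return of the check with the invariant (same filled prefix), the two loop registers and `entries` unchanged, and the walker's
`Lay.Has` fact of the checked range (`w_acc_11453a`: the load at 0x11453f needs it for its side goal `side_has`), stated for the
returned state's book address (`c3b_step_eqs`: it is the same address). -/
theorem c3b_head {Lay : Layout} (hLay : Lay.hi = 0x1000000) {μ : Microarch} (hμ : UserX.MicroOK μ) {u₀ : State}
    (hcode : HasCodeNat Lay u₀ Vorbis.L.start_decoder.entry Vorbis.Code.code_start_decoder.nat Vorbis.L.start_decoder.size)
    (h_load4 : Asan.SmallCheck Lay μ Vorbis.WayInv (Vorbis.CodeOK u₀) [.rax, .rcx, .rdx] 4 Vorbis.L.__asan_load4_noabort.entry)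
    {g : Ghost} {i : Nat} {A2 A3 Ai : Arena} {A : Arena × List Obj} {v : State}
    (hI : C3.Inv u₀ g i A2 A3 Ai A Vorbis.L.start_decoder.loop8 (v.reg .rbp).toNat v)
    (hle : ((v.reg .rbp).toNat : Int) ≤ Codebook.entries v.mem (g.cb v.mem i)) :
    ReachVia Lay μ Vorbis.WayInv v (fun w =>
      C3.Inv u₀ g i A2 A3 Ai A Vorbis.L.start_decoder.ret137 (v.reg .rbp).toNat w ∧
      w.reg .rbp = v.reg .rbp ∧ w.reg .r12 = v.reg .r12 ∧
      Lay.Has (addr (g.cb w.mem i) + 4) 4 ∧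
      Codebook.entries w.mem (g.cb w.mem i) = Codebook.entries v.mem (g.cb v.mem i)) := by
  have he := hI.frame.entry
  v_entry he
  have hW := hI.where_
  obtain ⟨q1, q2, q3, q4, q5, q6, q7, q8, q9, q10, q11, q12, q13, q14, q15, q16⟩ := hW
  have w_rip := hI.frame.rip
  have w_eq : Mem.EqOn Vorbis.L.textLo Vorbis.L.textHi u₀.mem v.mem := hI.frame.code
  have hdf : v.flags .df = false := (show abiInv _ from hI.frame.inv).1
  have hmx : v.mxcsr &&& 0x1F80 = 0x1F80 := (show abiInv _ from hI.frame.inv).2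
  have hsse := Vorbis.sseOK_of_abiInv hI.frame.inv
  have hRA : g.RA = (g.e.reg .rsp).toNat := rfl
  have hsp : (v.reg .rsp).toNat = g.R := by
    rw [hI.frame.rsp]
    exact toNat_addr _ (by omega)
  have w_r14 := hI.cur.r14
  have hsite := c3b_site_entries hI
  u_walk hcode [hμ.vendor] until [Vorbis.L.start_decoder.ret137] span [Vorbis.L.textLo, Vorbis.L.textHi] side (v_side)
  case check_11453a =>
    have hun : ShadowUntouched v.mem s_11453a.mem := by v_untouched
    have hwh := Vorbis.Spec.site_where hI.frame.shadow hI.frame.offText (by omega) hsite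
    have e : L.textHi = 0x119d40 := rfl
    have ecb : (addr (g.cb v.mem i)).toNat = g.cb v.mem i := toNat_addr _ (by omega)
    exact Vorbis.Spec.check_site hI.frame.shadow hun hsite (by u_omega)
  -- 0x11453f, the check returned: only the return address was pushed
  have hstep := C3.step_of_call (f := g.f) (cl := Codebook.codeword_lengths v.mem (g.cb v.mem i))
    (lo := (v.reg .rbp).toNat) (hi := (v.reg .rbp).toNat) (ws := []) hsp (by omega) (by omega) w_mem
    (Mem.SameExcept.refl _ _) (by
      intro w hw
      exact absurd hw List.not_mem_nil)
  have hinv : (conv u₀).inv s_11453ar := by v_inv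
  have hbits : Bits (g.Blk A) g.len s_11453ar.mem g.f := by
    have hkeep := Vorbis.Spec.Reader.store_off_obj hI.cur.sd.bits (v.reg .rsp - 8) 8 1131839 (by u_omega) (by u_omega)
    rw [← w_mem] at hkeep
    exact hkeep.1.bits
  have hIr := hI.carry (pc' := Vorbis.L.start_decoder.ret137) w_rip w_rsp (w_kept.get .r14 rfl) (w_kept.get .rbx rfl)
    hinv hstep (Nat.le_refl _) (Nat.le_refl _) (by omega) hbits
  obtain ⟨ecb', eent, _⟩ := c3b_step_eqs hI hstep (Nat.le_refl _) (by omega)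
  refine ReachVia.done ⟨hIr, w_kept.get .rbp rfl, w_kept.get .r12 rfl, ?_, ?_⟩
  · rw [ecb']
    exact w_acc_11453a
  · rw [ecb', eent]

set_option maxHeartbeats 4000000 in
/-- **The second basic block of a round** (0x11453f `mov eax,[r14+4] ; cmp eax,ebp ; jle 0x114590 ; sub eax,ebp ; mov edi,eax ; call ilog`):
either `entries ≤ current_entry` — then they are equal and the machine is at the loop's exit 0x114590 with every byte filled —, or
`current_entry < entries` and `ilog(entries − current_entry)` has returned (0x114550) with `eax ≤ 25` (`entries < 2^24`: K1), the invariant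
carried over ilog's stack-only footprint. `w_acc_11453a` is the `Lay.Has` fact of the check before (from `c3b_head`'s post). -/
theorem c3b_test {Lay : Layout} (hLay : Lay.hi = 0x1000000) {μ : Microarch} (hμ : UserX.MicroOK μ) {u₀ : State}
    (hcode : HasCodeNat Lay u₀ Vorbis.L.start_decoder.entry Vorbis.Code.code_start_decoder.nat Vorbis.L.start_decoder.size)
    (h_ilog : ∀ (others : List Obj) (frames : List (Nat × FrameLayout)), Calls Lay μ Vorbis.WayInv (Vorbis.conv u₀) Vorbis.L.ilog.entry (Vorbis.Spec.ilog.spec others frames))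
    {g : Ghost} {i : Nat} {A2 A3 Ai : Arena} {A : Arena × List Obj} {v : State}
    (hI : C3.Inv u₀ g i A2 A3 Ai A Vorbis.L.start_decoder.ret137 (v.reg .rbp).toNat v)
    (hle : ((v.reg .rbp).toNat : Int) ≤ Codebook.entries v.mem (g.cb v.mem i))
    (w_acc_11453a : Lay.Has (addr (g.cb v.mem i) + 4) 4)
    : ReachVia Lay μ Vorbis.WayInv v (fun w =>
      C3.Inv u₀ g i A2 A3 Ai A Vorbis.L.start_decoder.at_114590 (Codebook.entries w.mem (g.cb w.mem i)).toNat w ∨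
      (C3.Inv u₀ g i A2 A3 Ai A Vorbis.L.start_decoder.ret138 (v.reg .rbp).toNat w ∧
        w.reg .rbp = v.reg .rbp ∧ w.reg .r12 = v.reg .r12 ∧
        ((v.reg .rbp).toNat : Int) < Codebook.entries v.mem (g.cb v.mem i) ∧ (w.reg .rax).toNat ≤ 25 ∧
        Codebook.entries w.mem (g.cb w.mem i) = Codebook.entries v.mem (g.cb v.mem i))) := by
  have he := hI.frame.entry
  v_entry he
  have hW := hI.where_
  obtain ⟨q1, q2, q3, q4, q5, q6, q7, q8, q9, q10, q11, q12, q13, q14, q15, q16⟩ := hW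
  have w_rip := hI.frame.rip
  have w_eq : Mem.EqOn Vorbis.L.textLo Vorbis.L.textHi u₀.mem v.mem := hI.frame.code
  have hdf : v.flags .df = false := (show abiInv _ from hI.frame.inv).1
  have hmx : v.mxcsr &&& 0x1F80 = 0x1F80 := (show abiInv _ from hI.frame.inv).2
  have hsse := Vorbis.sseOK_of_abiInv hI.frame.inv
  have hRA : g.RA = (g.e.reg .rsp).toNat := rfl
  have hsp : (v.reg .rsp).toNat = g.R := by
    rw [hI.frame.rsp]
    exact toNat_addr _ (by omega)
  have w_r14 := hI.cur.r14
  have hil := h_ilog A.2 g.frames'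
  have hsite := c3b_site_entries hI
  have hwh := Vorbis.Spec.site_where hI.frame.shadow hI.frame.offText (by omega) hsite
  have e : L.textHi = 0x119d40 := rfl
  have ecb : (addr (g.cb v.mem i)).toNat = g.cb v.mem i := toNat_addr _ (by omega)
  have hn := hI.k1.ent_nonneg
  have hl := hI.k1.ent_lt
  have hent : v.mem.readLE (addr (g.cb v.mem i) + 4) 4 = (Codebook.entries v.mem (g.cb v.mem i)).toNat := by
    have ee : Codebook.entries v.mem (g.cb v.mem i) = sint32 (v.mem.readLE (addr (g.cb v.mem i) + 4) 4) := by
      simp only [vacc, voff, Mem.i32, Mem.u32, addr_add_lit]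
    have hc := sint32_cases (v.mem.readLE (addr (g.cb v.mem i) + 4) 4)
    rw [ee] at hn ⊢
    rcases hc with ⟨_, h2⟩ | ⟨h1, h2⟩
    · rw [h2]
      exact (Int.toNat_natCast _).symm
    · have hlt : v.mem.readLE (addr (g.cb v.mem i) + 4) 4 < 256 ^ 4 := Mem.readLE_lt' v.mem _ 4
      rw [h2] at hn
      omega
  u_walk hcode [hμ.vendor] until [Vorbis.L.start_decoder.ret138, Vorbis.L.start_decoder.at_114590] span [Vorbis.L.textLo, Vorbis.L.textHi] side (v_side)
  case call_inv => v_inv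
  case pre_11454b =>
    have hun : ShadowUntouched v.mem s_11454b.mem := by v_untouched
    have hshp : ShadowPre A.2 g.frames' s_11454b :=
      ⟨(hI.frame.shadow.untouched hun).lower (by rw [w_rsp]; u_omega) (by rw [w_rsp]; u_omega) (by rw [w_rsp]; u_omega),
        hI.frame.offText⟩
    exact ⟨hshp, hI.cur.hand.g_log2⟩
  · -- 0x114590: `entries ≤ current_entry`, hence equal: the loop's exit
    have hE : (Codebook.entries v.mem (g.cb v.mem i)).toNat < 2 ^ 32 := by omega
    rw [toInt_ofNat32 _ hE, Vorbis.Spec.part32_toInt] at hbr_114545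
    have hc1 := sint32_cases (Codebook.entries v.mem (g.cb v.mem i)).toNat
    have hc2 := sint32_cases ((v.reg .rbp).toNat % 2 ^ 32)
    have hce : (v.reg .rbp).toNat = (Codebook.entries v.mem (g.cb v.mem i)).toNat := by omega
    have hinv : (conv u₀).inv s_114545 := by v_inv
    have hs : Mem.SameExcept (C3.stepWins g.R g.f (Codebook.codeword_lengths v.mem (g.cb v.mem i))
        (v.reg .rbp).toNat (v.reg .rbp).toNat) v.mem s_114545.mem := by
      rw [w_mem]
      exact Mem.SameExcept.refl _ _
    have hbits : Bits (g.Blk A) g.len s_114545.mem g.f := by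
      rw [w_mem]
      exact hI.cur.sd.bits
    have hIr := hI.carry (pc' := Vorbis.L.start_decoder.at_114590) w_rip (w_kept.get .rsp rfl) (w_kept.get .r14 rfl)
      (w_kept.get .rbx rfl) hinv hs (Nat.le_refl _) (Nat.le_refl _) (by omega) hbits
    rw [hce, ← w_mem] at hIr
    exact ReachVia.done (Or.inl hIr)
  · -- 0x114550, ilog returned
    simp only [X86.User.Spec.footprint, vspec, w_rsp_11454b] at w_same
    have e_sub : (v.reg .rsp - 8).toNat = g.R - 8 := by u_omega
    rw [e_sub] at w_same
    have hE : (Codebook.entries v.mem (g.cb v.mem i)).toNat < 2 ^ 32 := by omega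
    rw [toInt_ofNat32 _ hE, Vorbis.Spec.part32_toInt] at hbr_114545
    have hc1 := sint32_cases (Codebook.entries v.mem (g.cb v.mem i)).toNat
    have hc2 := sint32_cases ((v.reg .rbp).toNat % 2 ^ 32)
    have hlt : ((v.reg .rbp).toNat : Int) < Codebook.entries v.mem (g.cb v.mem i) := by omega
    -- the argument of ilog: `entries − current_entry`, in [1, 2^24)
    have harg : (Word.part .w32 (s_11454b.reg .rdi)).toInt =
        Codebook.entries v.mem (g.cb v.mem i) - ((v.reg .rbp).toNat : Int) := by
      rw [w_rdi_11454b, X86.Word.part_w32_ofBV32, BitVec.toInt_eq_toNat_cond, BitVec.toNat_sub_of_le]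
      · rw [BitVec.toNat_ofNat, Asan.part32_toNat]
        simp only [Width.bits]
        split <;> omega
      · rw [BitVec.le_def, BitVec.toNat_ofNat, Asan.part32_toNat]
        simp only [Width.bits]
        omega
    -- the table of ilog is in the memory at its entry (one push since `v`)
    have hpush := c3b_stack_only (ws := []) hsp (by omega) (by omega) w_mem_11454b (Mem.SameExcept.refl _ _)
      (fun w hw => absurd hw List.not_mem_nil)
    have hlog : Log2_4In s_11454b.mem := by
      intro k hk16
      have e1 : (UInt64.ofNat (Vorbis.Globals.log2_4.beg + k)).toNat = 0x120640 + k := by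
        have := toNat_addr (Vorbis.Globals.log2_4.beg + k) (by simp only [Vorbis.Globals.log2_4]; omega)
        unfold addr at this
        rw [this]
        rfl
      rw [hpush.readLE _ 1 (by rw [e1]; omega) ?_]
      · exact hI.frame.sh7 k hk16
      · intro w hw
        simp only [List.mem_cons, List.mem_nil_iff, or_false] at hw
        subst hw
        rw [e1]
        simp only []
        omega
    have hrax : (s_11454br.reg .rax).toNat ≤ 25 := by
      have hp := w_post.2.2 hlog
      rw [hp, harg]
      exact ilogVal_le_of_lt _ 25 (by omega) (by omega)
    have hst := c3b_stack_only hsp (by omega) (by omega) w_mem_11454b w_same (by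
      intro w hw
      simp only [List.mem_cons, List.mem_nil_iff, or_false] at hw
      subst hw
      simp only []
      omega)
    have hstep := C3.step_of_call (f := g.f) (cl := Codebook.codeword_lengths v.mem (g.cb v.mem i))
      (lo := (v.reg .rbp).toNat) (hi := (v.reg .rbp).toNat) hsp (by omega) (by omega) w_mem_11454b w_same (by
        intro w hw
        simp only [List.mem_cons, List.mem_nil_iff, or_false] at hw
        subst hw
        simp only []
        omega)
    have hbits := c3b_bits_stack hI.cur.sd.bits hst q3 q6 q4 q5
    have hIr := hI.carry (pc' := Vorbis.L.start_decoder.ret138) w_rip w_rsp (w_kept.get .r14 rfl) (w_kept.get .rbx rfl)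
      w_inv hstep (Nat.le_refl _) (Nat.le_refl _) (by omega) hbits
    obtain ⟨ecb', eent, _⟩ := c3b_step_eqs hI hstep (Nat.le_refl _) (by omega)
    refine ReachVia.done (Or.inr ⟨hIr, w_kept.get .rbp rfl, w_kept.get .r12 rfl, hlt, hrax, ?_⟩)
    rw [ecb', eent]

set_option maxHeartbeats 4000000 in
/-- **The third basic block of a round** (0x114550 `mov esi,eax ; mov rdi,[rsp+18H] ; call get_bits`): `n = get_bits(f, ilog(limit))` has
returned (0x11455c) with `eax = n < 2^25` (`GetBitsResult` with at most 25 bits), the invariant carried over the reader's footprint. -/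
theorem c3b_getn {Lay : Layout} (hLay : Lay.hi = 0x1000000) {μ : Microarch} (hμ : UserX.MicroOK μ) {u₀ : State}
    (hcode : HasCodeNat Lay u₀ Vorbis.L.start_decoder.entry Vorbis.Code.code_start_decoder.nat Vorbis.L.start_decoder.size)
    (h_get_bits : ∀ (others : List Obj) (frames : List (Nat × FrameLayout)) (Blk : Block → Prop) (len : Nat),
      Calls Lay μ Vorbis.WayInv (Vorbis.conv u₀) Vorbis.L.get_bits.entry (Vorbis.Spec.get_bits.spec others frames Blk len))
    {g : Ghost} {i : Nat} {A2 A3 Ai : Arena} {A : Arena × List Obj} {ce : Nat} {v : State}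
    (hI : C3.Inv u₀ g i A2 A3 Ai A Vorbis.L.start_decoder.ret138 ce v)
    (hle : (ce : Int) ≤ Codebook.entries v.mem (g.cb v.mem i))
    (hax : (v.reg .rax).toNat ≤ 25) :
    ReachVia Lay μ Vorbis.WayInv v (fun w =>
      C3.Inv u₀ g i A2 A3 Ai A Vorbis.L.start_decoder.ret139 ce w ∧
      w.reg .rbp = v.reg .rbp ∧ w.reg .r12 = v.reg .r12 ∧ (w.reg .rax).toNat < 2 ^ 25 ∧
      Codebook.entries w.mem (g.cb w.mem i) = Codebook.entries v.mem (g.cb v.mem i)) := by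
  have he := hI.frame.entry
  v_entry he
  have hgb := h_get_bits A.2 g.frames' (g.Blk A) g.len
  have hW := hI.where_
  obtain ⟨q1, q2, q3, q4, q5, q6, q7, q8, q9, q10, q11, q12, q13, q14, q15, q16⟩ := hW
  have w_rip := hI.frame.rip
  have w_eq : Mem.EqOn Vorbis.L.textLo Vorbis.L.textHi u₀.mem v.mem := hI.frame.code
  have hdf : v.flags .df = false := (show abiInv _ from hI.frame.inv).1
  have hmx : v.mxcsr &&& 0x1F80 = 0x1F80 := (show abiInv _ from hI.frame.inv).2
  have hsse := Vorbis.sseOK_of_abiInv hI.frame.inv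
  have hRA : g.RA = (g.e.reg .rsp).toNat := rfl
  have hn := hI.k1.ent_nonneg
  have hsp : (v.reg .rsp).toNat = g.R := by
    rw [hI.frame.rsp]
    exact toNat_addr _ (by omega)
  have hslotf : v.mem.readLE (v.reg .rsp + 24) 8 = g.f := by
    have := hI.cur.slot_f
    rw [hI.frame.rsp]
    simp only [vfield]
    exact this
  u_walk hcode [hμ.vendor] until [Vorbis.L.start_decoder.ret139] span [Vorbis.L.textLo, Vorbis.L.textHi] side (v_side)
  case call_inv => v_inv
  case pre_114557 =>
    have hun : ShadowUntouched v.mem s_114557.mem := by v_untouched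
    have hshp : ShadowPre A.2 g.frames' s_114557 :=
      ⟨(hI.frame.shadow.untouched hun).lower (by rw [w_rsp]; u_omega) (by rw [w_rsp]; u_omega) (by rw [w_rsp]; u_omega),
        hI.frame.offText⟩
    have hkeep := Vorbis.Spec.Reader.store_off_obj hI.cur.sd.bits (v.reg .rsp - 8) 8 1131868 (by u_omega) (by u_omega)
    rw [← w_mem] at hkeep
    have erdi : (s_114557.reg .rdi).toNat = g.f := by
      rw [w_rdi]
      exact toNat_addr _ (by omega)
    refine ⟨⟨hshp, ?_, ?_⟩, ?_⟩
    · rw [erdi]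
      exact readerEnv hI.cur.hand hI.cur.sd.env.live
    · rw [erdi]
      exact hkeep.1.bits
    · rw [Vorbis.Spec.bitsArg_def, w_rsi]
      rw [Vorbis.toNat_ofBV32, Asan.part32_toNat]
      omega
  -- 0x11455c, get_bits(f, ilog) returned: the invariant at the returned state
  simp only [X86.User.Spec.footprint, vspec, w_rsp_114557, w_rdi_114557] at w_same
  have e_sub : (v.reg .rsp - 8).toNat = g.R - 8 := by u_omega
  have e_f : (UInt64.ofNat g.f).toNat = g.f := toNat_addr _ (by omega)
  rw [e_sub, e_f] at w_same
  have hstep := C3.step_of_call (f := g.f) (cl := Codebook.codeword_lengths v.mem (g.cb v.mem i))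
    (lo := ce) (hi := ce) hsp (by omega) (by omega) w_mem_114557 w_same (by
      intro w hw
      simp only [List.mem_cons, List.mem_nil_iff, or_false] at hw
      rcases hw with rfl | rfl | rfl | rfl | rfl | rfl <;> simp only [] <;> omega)
  have ek : (Word.ofBV (Word.part Width.w32 (v.reg .rax))).toNat % 2 ^ 32 = (v.reg .rax).toNat := by
    rw [Vorbis.toNat_ofBV32, Asan.part32_toNat]
    omega
  have hpost : Vorbis.Spec.GetBitsSpecPost (g.Blk A) g.len g.f (v.reg .rax).toNat s_114557 s_114557r := by
    have := w_post
    simp only [Vorbis.Spec.get_bits.spec, Vorbis.Spec.bitsArg_def, w_rdi_114557, w_rsi_114557, e_f, ek] at this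
    exact this
  have hIr := hI.carry (pc' := Vorbis.L.start_decoder.ret139) w_rip w_rsp (w_kept.get .r14 rfl) (w_kept.get .rbx rfl)
    w_inv hstep (Nat.le_refl _) (Nat.le_refl _) (by omega) hpost.bits.bits
  obtain ⟨ecb', eent, _⟩ := c3b_step_eqs hI hstep (Nat.le_refl _) (by omega)
  refine ReachVia.done ⟨hIr, w_kept.get .rbp rfl, w_kept.get .r12 rfl, ?_, ?_⟩
  · have hres := hpost.bits.result
    unfold GetBitsResult at hres
    have h1 := hres.2 (by omega)
    have h2 : 2 ^ (v.reg .rax).toNat ≤ 2 ^ 25 := Nat.pow_le_pow_right (by decide) hax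
    omega
  · rw [ecb', eent]

set_option maxHeartbeats 4000000 in
/-- **The fourth basic block of a round** (0x11455c `mov r13d,eax ; cmp r12d,31 ; jg <stub>` … 0x11456e the second check of `c->entries`):
`current_length ≥ 32` goes through the error stub 0x114507 (`error(f, 20)`, `jmp 0x113b22`) to `AtERR`; otherwise the machine is at the
return of the check (0x114573) with `r13d = n`, `r15d = current_entry + n`, `current_length ≤ 31`, the invariant carried, `entries`
unchanged, and the `Lay.Has` fact of the checked range (spelled with `r14 = c`: the load at 0x114573 needs it). -/
theorem c3b_len {Lay : Layout} (hLay : Lay.hi = 0x1000000) {μ : Microarch} (hμ : UserX.MicroOK μ) {u₀ : State}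
    (hcode : HasCodeNat Lay u₀ Vorbis.L.start_decoder.entry Vorbis.Code.code_start_decoder.nat Vorbis.L.start_decoder.size)
    (h_error : ∀ (others : List Obj) (frames : List (Nat × FrameLayout)), Calls Lay μ Vorbis.WayInv (Vorbis.conv u₀) Vorbis.L.error.entry (Vorbis.Spec.error.spec others frames))
    (h_load4 : Asan.SmallCheck Lay μ Vorbis.WayInv (Vorbis.CodeOK u₀) [.rax, .rcx, .rdx] 4 Vorbis.L.__asan_load4_noabort.entry)
    {g : Ghost} {i : Nat} {A2 A3 Ai : Arena} {A : Arena × List Obj} {ce : Nat} {v : State}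
    (hI : C3.Inv u₀ g i A2 A3 Ai A Vorbis.L.start_decoder.ret139 ce v)
    (hle : (ce : Int) ≤ Codebook.entries v.mem (g.cb v.mem i))
    (hr12 : (v.reg .r12).toNat ≤ 32)
    :
    ReachVia Lay μ Vorbis.WayInv v (fun w => AtERR u₀ g w ∨
      (C3.Inv u₀ g i A2 A3 Ai A Vorbis.L.start_decoder.ret140 ce w ∧
        w.reg .rbp = v.reg .rbp ∧ w.reg .r12 = v.reg .r12 ∧ (v.reg .r12).toNat ≤ 31 ∧
        w.reg .r13 = Word.ofBV (Word.part Width.w32 (v.reg .rax)) ∧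
        w.reg .r15 = Word.ofBV (BitVec.setWidth 32 (v.reg .rbp + v.reg .rax).toBitVec) ∧
        Lay.Has (w.reg .r14 + 4) 4 ∧
        Codebook.entries w.mem (g.cb w.mem i) = Codebook.entries v.mem (g.cb v.mem i))) := by
  have he := hI.frame.entry
  v_entry he
  have her := h_error A.2 g.frames'
  have hW := hI.where_
  obtain ⟨q1, q2, q3, q4, q5, q6, q7, q8, q9, q10, q11, q12, q13, q14, q15, q16⟩ := hW
  have w_rip := hI.frame.rip
  have w_eq : Mem.EqOn Vorbis.L.textLo Vorbis.L.textHi u₀.mem v.mem := hI.frame.code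
  have hdf : v.flags .df = false := (show abiInv _ from hI.frame.inv).1
  have hmx : v.mxcsr &&& 0x1F80 = 0x1F80 := (show abiInv _ from hI.frame.inv).2
  have hsse := Vorbis.sseOK_of_abiInv hI.frame.inv
  have hRA : g.RA = (g.e.reg .rsp).toNat := rfl
  have hn := hI.k1.ent_nonneg
  have hl := hI.k1.ent_lt
  have hsp : (v.reg .rsp).toNat = g.R := by
    rw [hI.frame.rsp]
    exact toNat_addr _ (by omega)
  have hslotf : v.mem.readLE (v.reg .rsp + 24) 8 = g.f := by
    have := hI.cur.slot_f
    rw [hI.frame.rsp]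
    simp only [vfield]
    exact this
  have hr14 := hI.cur.r14
  have hsite := c3b_site_entries hI
  have hwh := Vorbis.Spec.site_where hI.frame.shadow hI.frame.offText (by omega) hsite
  have e : L.textHi = 0x119d40 := rfl
  have ecb : (addr (g.cb v.mem i)).toNat = g.cb v.mem i := toNat_addr _ (by omega)
  u_walk hcode [hμ.vendor] until [Vorbis.L.start_decoder.ret140, Vorbis.L.start_decoder.cut4] span [Vorbis.L.textLo, Vorbis.L.textHi] side (v_side)
  case call_inv => v_inv
  case pre_114514 =>
    have hun : ShadowUntouched v.mem s_114514.mem := by v_untouched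
    have hshp : ShadowPre A.2 g.frames' s_114514 :=
      ⟨(hI.frame.shadow.untouched hun).lower (by rw [w_rsp]; u_omega) (by rw [w_rsp]; u_omega) (by rw [w_rsp]; u_omega),
        hI.frame.offText⟩
    have erdi : (s_114514.reg .rdi).toNat = g.f := by
      rw [w_rdi]
      exact toNat_addr _ (by omega)
    refine ⟨hshp, ?_⟩
    rw [erdi]
    exact (readerEnv hI.cur.hand hI.cur.sd.env.live).obj
  case check_11456e =>
    have hun : ShadowUntouched v.mem s_11456e.mem := by v_untouched
    exact Vorbis.Spec.check_site hI.frame.shadow hun hsite (by u_omega)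
  · -- 0x114519: `error(f, 20)` returned (current_length ≥ 32)
    simp only [X86.User.Spec.footprint, vspec, w_rsp_114514, w_rdi_114514] at w_same
    have e_sub : (v.reg .rsp - 8).toNat = g.R - 8 := by u_omega
    have e_f : (UInt64.ofNat g.f).toNat = g.f := toNat_addr _ (by omega)
    rw [e_sub, e_f] at w_same
    have hstep := C3.step_of_call (f := g.f) (cl := Codebook.codeword_lengths v.mem (g.cb v.mem i))
      (lo := ce) (hi := ce) hsp (by omega) (by omega) w_mem_114514 w_same (by
        intro w hw
        simp only [List.mem_cons, List.mem_nil_iff, or_false] at hw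
        rcases hw with rfl | rfl <;> simp only [] <;> omega)
    have hkeep := Vorbis.Spec.Reader.store_off_obj hI.cur.sd.bits (v.reg .rsp - 8) 8 1131801 (by u_omega) (by u_omega)
    rw [← w_mem_114514] at hkeep
    have hbits : Bits (g.Blk A) g.len s_114514r.mem g.f := by
      apply hkeep.1.bits.frame_fields
      apply Bits.SameFields.of_sameExcept w_same
      all_goals
        intro w hw
        simp only [List.mem_cons, List.mem_nil_iff, or_false] at hw
        rcases hw with rfl | rfl <;> simp only [] <;> omega
    have hIr := hI.carry (pc' := Vorbis.L.start_decoder.cut103) w_rip w_rsp (w_kept.get .r14 rfl) (w_kept.get .rbx rfl)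
      w_inv hstep (Nat.le_refl _) (Nat.le_refl _) (by omega) hbits
    have hrax0 : s_114514r.reg .rax = 0 := w_post.1
    have w_eq := Vorbis.conv_code_eqOn w_code
    have hrsp_r := w_rsp
    have hr14_r := w_kept.get .r14 rfl
    have hrbx_r := w_kept.get .rbx rfl
    clear w_same w_post hstep hkeep
    u_walk hcode [hμ.vendor] until [Vorbis.L.start_decoder.cut4] span [Vorbis.L.textLo, Vorbis.L.textHi] side (v_side)
    have hinv : abiInv s_114519 := by
      obtain ⟨h1, h2⟩ := (show abiInv _ from w_inv)
      exact ⟨by rw [w_flags]; exact h1, by rw [w_mxcsr]; exact h2⟩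
    exact ReachVia.done (Or.inl (c3b_err_exit hIr w_rip (w_rsp.trans hrsp_r.symm) ((w_kept.get .r14 rfl).trans hr14_r.symm)
      ((w_kept.get .rbx rfl).trans hrbx_r.symm) hinv w_mem w_rax))
  · -- 0x114573: the check of `c->entries` returned; only the return address was pushed
    have h31 : (31#32 : BitVec 32).toInt = 31 := by decide
    rw [h31, Vorbis.Spec.part32_toInt] at hbr_114563
    have hc := sint32_cases ((v.reg .r12).toNat % 2 ^ 32)
    have hstep := C3.step_of_call (f := g.f) (cl := Codebook.codeword_lengths v.mem (g.cb v.mem i))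
      (lo := ce) (hi := ce) (ws := []) hsp (by omega) (by omega) w_mem
      (Mem.SameExcept.refl _ _) (by
        intro w hw
        exact absurd hw List.not_mem_nil)
    have hinv : (conv u₀).inv s_11456er := by v_inv
    have hbits : Bits (g.Blk A) g.len s_11456er.mem g.f := by
      have hkeep := Vorbis.Spec.Reader.store_off_obj hI.cur.sd.bits (v.reg .rsp - 8) 8 1131891 (by u_omega) (by u_omega)
      rw [← w_mem] at hkeep
      exact hkeep.1.bits
    have hIr := hI.carry (pc' := Vorbis.L.start_decoder.ret140) w_rip w_rsp (w_kept.get .r14 rfl) (w_kept.get .rbx rfl)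
      hinv hstep (Nat.le_refl _) (Nat.le_refl _) (by omega) hbits
    obtain ⟨ecb', eent, _⟩ := c3b_step_eqs hI hstep (Nat.le_refl _) (by omega)
    refine ReachVia.done (Or.inr ⟨hIr, w_kept.get .rbp rfl, w_kept.get .r12 rfl, by omega, w_r13, w_r15, ?_, ?_⟩)
    · rw [w_kept.get .r14 rfl, hr14]
      exact w_acc_11456e
    · rw [ecb', eent]

/-- **The signed compare `cmp r15d, [r14+4] ; jle`** (0x114573) with `r15d = current_entry + n`: both operands are small naturals
(`entries < 2^24`: K1, `n < 2^25`), so the 32-bit signed compare is the compare of the numbers. -/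
theorem c3b_cmp_le {ce n : Nat} {E : Int} (hE0 : 0 ≤ E) (hE : E < 16777216) (hce : (ce : Int) ≤ E) (hn : n < 2 ^ 25)
    (h : (Word.part Width.w32 (UInt64.ofNat (ce + n))).toInt ≤ (BitVec.ofNat 32 E.toNat).toInt) : ce + n ≤ E.toNat := by
  have hE32 : E.toNat < 2 ^ 32 := by omega
  have e : (UInt64.ofNat (ce + n)).toNat = ce + n := toNat_addr _ (by omega)
  rw [toInt_ofNat32 _ hE32, Vorbis.Spec.part32_toInt, e] at h
  have hc1 := sint32_cases E.toNat
  have hc2 := sint32_cases ((ce + n) % 2 ^ 32)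
  omega

set_option maxHeartbeats 4000000 in
/-- **The fifth basic block of a round** (0x114573 `cmp r15d,[r14+4] ; jle 0x11451e`): `current_entry + n > entries` goes through the
error stub 0x114579 (`error(f, 20)`, `jmp 0x113b22`) to `AtERR`; otherwise `memset(lengths + current_entry, current_length, n)`
(0x11451e–0x11452a) has returned (0x11452f) with the invariant carried over memset's footprint (its stack, the bytes
`lengths[ce .. ce + n)`) and the filled prefix EXTENDED to `ce + n` (every new byte is `current_length` ∈ [1, 31]: memset's post). -/
theorem c3b_fill {Lay : Layout} (hLay : Lay.hi = 0x1000000) {μ : Microarch} (hμ : UserX.MicroOK μ) {u₀ : State}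
    (hcode : HasCodeNat Lay u₀ Vorbis.L.start_decoder.entry Vorbis.Code.code_start_decoder.nat Vorbis.L.start_decoder.size)
    (h_error : ∀ (others : List Obj) (frames : List (Nat × FrameLayout)), Calls Lay μ Vorbis.WayInv (Vorbis.conv u₀) Vorbis.L.error.entry (Vorbis.Spec.error.spec others frames))
    (h_memset : ∀ (others : List Obj) (frames : List (Nat × FrameLayout)), Calls Lay μ Vorbis.WayInv (Vorbis.conv u₀) Vorbis.L.memset.entry (Vorbis.Spec.memset.spec others frames))
    {g : Ghost} {i : Nat} {A2 A3 Ai : Arena} {A : Arena × List Obj} {ce n : Nat} {v : State}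
    (hI : C3.Inv u₀ g i A2 A3 Ai A Vorbis.L.start_decoder.ret140 ce v)
    (hle : (ce : Int) ≤ Codebook.entries v.mem (g.cb v.mem i))
    (hrbp : v.reg .rbp = UInt64.ofNat ce) (hr13 : v.reg .r13 = UInt64.ofNat n) (hr15 : v.reg .r15 = UInt64.ofNat (ce + n))
    (hn25 : n < 2 ^ 25) (h1 : 1 ≤ (v.reg .r12).toNat) (h31 : (v.reg .r12).toNat ≤ 31)
    (hacc : Lay.Has (v.reg .r14 + 4) 4) :
    ReachVia Lay μ Vorbis.WayInv v (fun w => AtERR u₀ g w ∨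
      (C3.Inv u₀ g i A2 A3 Ai A Vorbis.L.start_decoder.ret136 (ce + n) w ∧
        w.reg .r12 = v.reg .r12 ∧ w.reg .r15 = v.reg .r15 ∧
        ((ce + n : Nat) : Int) ≤ Codebook.entries w.mem (g.cb w.mem i))) := by
  have he := hI.frame.entry
  v_entry he
  have her := h_error A.2 g.frames'
  have hms := h_memset A.2 g.frames'
  have hW := hI.where_
  obtain ⟨q1, q2, q3, q4, q5, q6, q7, q8, q9, q10, q11, q12, q13, q14, q15, q16⟩ := hW
  have w_rip := hI.frame.rip
  have w_eq : Mem.EqOn Vorbis.L.textLo Vorbis.L.textHi u₀.mem v.mem := hI.frame.code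
  have hdf : v.flags .df = false := (show abiInv _ from hI.frame.inv).1
  have hmx : v.mxcsr &&& 0x1F80 = 0x1F80 := (show abiInv _ from hI.frame.inv).2
  have hsse := Vorbis.sseOK_of_abiInv hI.frame.inv
  have hRA : g.RA = (g.e.reg .rsp).toNat := rfl
  have hn := hI.k1.ent_nonneg
  have hl := hI.k1.ent_lt
  have hsp : (v.reg .rsp).toNat = g.R := by
    rw [hI.frame.rsp]
    exact toNat_addr _ (by omega)
  have hslotf : v.mem.readLE (v.reg .rsp + 24) 8 = g.f := by
    have := hI.cur.slot_f
    rw [hI.frame.rsp]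
    simp only [vfield]
    exact this
  have hr14 := hI.cur.r14
  have hrbx := hI.rbx
  have w_acc_11456e : Lay.Has (addr (g.cb v.mem i) + 4) 4 := by
    rw [← hr14]
    exact hacc
  have hsite := c3b_site_entries hI
  have hwh := Vorbis.Spec.site_where hI.frame.shadow hI.frame.offText (by omega) hsite
  have e : L.textHi = 0x119d40 := rfl
  have ecb : (addr (g.cb v.mem i)).toNat = g.cb v.mem i := toNat_addr _ (by omega)
  have hent : v.mem.readLE (addr (g.cb v.mem i) + 4) 4 = (Codebook.entries v.mem (g.cb v.mem i)).toNat := by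
    have ee : Codebook.entries v.mem (g.cb v.mem i) = sint32 (v.mem.readLE (addr (g.cb v.mem i) + 4) 4) := by
      simp only [vacc, voff, Mem.i32, Mem.u32, addr_add_lit]
    have hc := sint32_cases (v.mem.readLE (addr (g.cb v.mem i) + 4) 4)
    rw [ee] at hn ⊢
    rcases hc with ⟨_, h2⟩ | ⟨h1, h2⟩
    · rw [h2]
      exact (Int.toNat_natCast _).symm
    · have hlt : v.mem.readLE (addr (g.cb v.mem i) + 4) 4 < 256 ^ 4 := Mem.readLE_lt' v.mem _ 4
      rw [h2] at hn
      omega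
  have hce24 : ce < 2 ^ 24 := by omega
  have erdx : (UInt64.ofNat n).toNat = n := toNat_addr _ (by omega)
  have erdi : (UInt64.ofNat ce + addr (Codebook.codeword_lengths v.mem (g.cb v.mem i))).toNat =
      Codebook.codeword_lengths v.mem (g.cb v.mem i) + ce := by
    have := addr_add (Codebook.codeword_lengths v.mem (g.cb v.mem i)) ce
    rw [UInt64.add_comm, this]
    exact toNat_addr _ (by omega)
  u_walk hcode [hμ.vendor, cnt32_sext ce (by omega), cnt32_sext n (by omega)] until [Vorbis.L.start_decoder.ret136, Vorbis.L.start_decoder.cut4] span [Vorbis.L.textLo, Vorbis.L.textHi] side (v_side)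
  case call_inv => v_inv
  case pre_11452a =>
    have hcmp := c3b_cmp_le hn hl hle hn25 hbr_114577
    have hun : ShadowUntouched v.mem s_11452a.mem := by v_untouched
    have hshp : ShadowPre A.2 g.frames' s_11452a :=
      ⟨(hI.frame.shadow.untouched hun).lower (by rw [w_rsp]; u_omega) (by rw [w_rsp]; u_omega) (by rw [w_rsp]; u_omega),
        hI.frame.offText⟩
    have hlive : LiveIn A.2 g.frames' (Codebook.codeword_lengths v.mem (g.cb v.mem i))
        (Codebook.entries v.mem (g.cb v.mem i)).toNat := liveIn_of_arenaBlk hI.cur.sd.arena hI.lengths.1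
    refine ⟨hshp, Or.inr ?_⟩
    rw [w_rdi, w_rdx, erdi, erdx]
    exact hlive.sub _ _ (by omega) (by omega)
  case call_inv => v_inv
  case pre_114586 =>
    have hun : ShadowUntouched v.mem s_114586.mem := by v_untouched
    have hshp : ShadowPre A.2 g.frames' s_114586 :=
      ⟨(hI.frame.shadow.untouched hun).lower (by rw [w_rsp]; u_omega) (by rw [w_rsp]; u_omega) (by rw [w_rsp]; u_omega),
        hI.frame.offText⟩
    have erdi' : (s_114586.reg .rdi).toNat = g.f := by
      rw [w_rdi]
      exact toNat_addr _ (by omega)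
    refine ⟨hshp, ?_⟩
    rw [erdi']
    exact (readerEnv hI.cur.hand hI.cur.sd.env.live).obj
  · -- 0x11452f: memset returned
    have hcmp := c3b_cmp_le hn hl hle hn25 hbr_114577
    simp only [X86.User.Spec.footprint, vspec, w_rsp_11452a, w_rdi_11452a, w_rdx_11452a] at w_same
    have e_sub : (v.reg .rsp - 8).toNat = g.R - 8 := by u_omega
    rw [e_sub, erdi, erdx] at w_same
    have hstep := C3.step_of_call (f := g.f) (cl := Codebook.codeword_lengths v.mem (g.cb v.mem i))
      (lo := ce) (hi := ce + n) hsp (by omega) (by omega) w_mem_11452a w_same (by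
        intro w hw
        simp only [List.mem_cons, List.mem_nil_iff, or_false] at hw
        rcases hw with rfl | rfl <;> simp only [] <;> omega)
    have hkeep := Vorbis.Spec.Reader.store_off_obj hI.cur.sd.bits (v.reg .rsp - 8) 8 1131823 (by u_omega) (by u_omega)
    rw [← w_mem_11452a] at hkeep
    have hbits : Bits (g.Blk A) g.len s_11452ar.mem g.f := by
      apply hkeep.1.bits.frame_fields
      apply Bits.SameFields.of_sameExcept w_same
      all_goals
        intro w hw
        simp only [List.mem_cons, List.mem_nil_iff, or_false] at hw
        rcases hw with rfl | rfl <;> simp only [] <;> omega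
    have hIr := hI.carry (pc' := Vorbis.L.start_decoder.ret136) w_rip w_rsp (w_kept.get .r14 rfl) (w_kept.get .rbx rfl)
      w_inv hstep (Nat.le_refl _) (by omega) hcmp hbits
    obtain ⟨ecb', eent, ecl⟩ := c3b_step_eqs hI hstep (by omega) hcmp
    have ecl' : Codebook.codeword_lengths s_11452ar.mem (g.cb s_11452ar.mem i) =
        Codebook.codeword_lengths v.mem (g.cb v.mem i) := by
      rw [ecb', ecl]
    have eent' : Codebook.entries s_11452ar.mem (g.cb s_11452ar.mem i) = Codebook.entries v.mem (g.cb v.mem i) := by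
      rw [ecb', eent]
    -- the bytes memset wrote: `current_length` ∈ [1, 31]
    have ersi : (s_11452a.reg .rsi).toNat % 256 = (v.reg .r12).toNat := by
      rw [w_rsi_11452a, Vorbis.toNat_ofBV32, Asan.part32_toNat]
      omega
    have hfill : ∀ j, j < ce + n →
        1 ≤ s_11452ar.mem.u8 (Codebook.codeword_lengths s_11452ar.mem (g.cb s_11452ar.mem i) + j) ∧
        s_11452ar.mem.u8 (Codebook.codeword_lengths s_11452ar.mem (g.cb s_11452ar.mem i) + j) ≤ 31 := by
      intro j hj
      by_cases hjc : j < ce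
      · exact hIr.filled j hjc
      · have hp := w_post.2.2 (j - ce) (by rw [w_rdx_11452a, erdx]; omega)
        have ea : s_11452a.reg .rdi + UInt64.ofNat (j - ce) =
            addr (Codebook.codeword_lengths v.mem (g.cb v.mem i) + j) := by
          rw [w_rdi_11452a, UInt64.add_comm (UInt64.ofNat ce), addr_add, addr_add]
          congr 1
          omega
        rw [ea, ersi] at hp
        rw [ecl']
        unfold Mem.u8
        rw [hp]
        omega
    have hIr' : C3.Inv u₀ g i A2 A3 Ai A Vorbis.L.start_decoder.ret136 (ce + n) s_11452ar := { hIr with filled := hfill }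
    refine ReachVia.done (Or.inr ⟨hIr', w_kept.get .r12 rfl, (w_kept.get .r15 rfl).trans hr15, ?_⟩)
    rw [eent']
    omega
  · -- 0x11458b: `error(f, 20)` returned (current_entry + n > entries)
    simp only [X86.User.Spec.footprint, vspec, w_rsp_114586, w_rdi_114586] at w_same
    have e_sub : (v.reg .rsp - 8).toNat = g.R - 8 := by u_omega
    have e_f : (UInt64.ofNat g.f).toNat = g.f := toNat_addr _ (by omega)
    rw [e_sub, e_f] at w_same
    have hstep := C3.step_of_call (f := g.f) (cl := Codebook.codeword_lengths v.mem (g.cb v.mem i))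
      (lo := ce) (hi := ce) hsp (by omega) (by omega) w_mem_114586 w_same (by
        intro w hw
        simp only [List.mem_cons, List.mem_nil_iff, or_false] at hw
        rcases hw with rfl | rfl <;> simp only [] <;> omega)
    have hkeep := Vorbis.Spec.Reader.store_off_obj hI.cur.sd.bits (v.reg .rsp - 8) 8 1131915 (by u_omega) (by u_omega)
    rw [← w_mem_114586] at hkeep
    have hbits : Bits (g.Blk A) g.len s_114586r.mem g.f := by
      apply hkeep.1.bits.frame_fields
      apply Bits.SameFields.of_sameExcept w_same
      all_goals
        intro w hw
        simp only [List.mem_cons, List.mem_nil_iff, or_false] at hw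
        rcases hw with rfl | rfl <;> simp only [] <;> omega
    have hIr := hI.carry (pc' := Vorbis.L.start_decoder.cut108) w_rip w_rsp (w_kept.get .r14 rfl) (w_kept.get .rbx rfl)
      w_inv hstep (Nat.le_refl _) (Nat.le_refl _) (by omega) hbits
    have hrax0 : s_114586r.reg .rax = 0 := w_post.1
    have w_eq := Vorbis.conv_code_eqOn w_code
    have hrsp_r := w_rsp
    have hr14_r := w_kept.get .r14 rfl
    have hrbx_r := w_kept.get .rbx rfl
    clear w_same w_post hstep hkeep
    u_walk hcode [hμ.vendor] until [Vorbis.L.start_decoder.cut4] span [Vorbis.L.textLo, Vorbis.L.textHi] side (v_side)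
    have hinv : abiInv s_11458b := by
      obtain ⟨k1, k2⟩ := (show abiInv _ from w_inv)
      exact ⟨by rw [w_flags]; exact k1, by rw [w_mxcsr]; exact k2⟩
    exact ReachVia.done (Or.inl (c3b_err_exit hIr w_rip (w_rsp.trans hrsp_r.symm) ((w_kept.get .r14 rfl).trans hr14_r.symm)
      ((w_kept.get .rbx rfl).trans hrbx_r.symm) hinv w_mem w_rax))

set_option maxHeartbeats 4000000 in
/-- **The back edge of a round** (0x11452f `add r12d,1 ; mov ebp,r15d`, then the loop head 0x114536): `++current_length`
(`≤ 32`, since the test at 0x11455f let only `current_length ≤ 31` through), `current_entry += n` (the sum is in `r15d`); nothing is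
stored, the invariant is carried with the empty change. -/
theorem c3b_back {Lay : Layout} (hLay : Lay.hi = 0x1000000) {μ : Microarch} (hμ : UserX.MicroOK μ) {u₀ : State}
    (hcode : HasCodeNat Lay u₀ Vorbis.L.start_decoder.entry Vorbis.Code.code_start_decoder.nat Vorbis.L.start_decoder.size)
    {g : Ghost} {i : Nat} {A2 A3 Ai : Arena} {A : Arena × List Obj} {ce : Nat} {v : State}
    (hI : C3.Inv u₀ g i A2 A3 Ai A Vorbis.L.start_decoder.ret136 ce v)
    (hle : (ce : Int) ≤ Codebook.entries v.mem (g.cb v.mem i))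
    (hr15 : v.reg .r15 = UInt64.ofNat ce) (h1 : 1 ≤ (v.reg .r12).toNat) (h31 : (v.reg .r12).toNat ≤ 31) :
    ReachVia Lay μ Vorbis.WayInv v (fun w =>
      C3.Inv u₀ g i A2 A3 Ai A Vorbis.L.start_decoder.loop8 (w.reg .rbp).toNat w ∧
      (w.reg .r12).toNat = (v.reg .r12).toNat + 1 ∧
      ((w.reg .rbp).toNat : Int) ≤ Codebook.entries w.mem (g.cb w.mem i)) := by
  have he := hI.frame.entry
  v_entry he
  have hW := hI.where_
  obtain ⟨q1, q2, q3, q4, q5, q6, q7, q8, q9, q10, q11, q12, q13, q14, q15, q16⟩ := hW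
  have w_rip := hI.frame.rip
  have w_eq : Mem.EqOn Vorbis.L.textLo Vorbis.L.textHi u₀.mem v.mem := hI.frame.code
  have hdf : v.flags .df = false := (show abiInv _ from hI.frame.inv).1
  have hmx : v.mxcsr &&& 0x1F80 = 0x1F80 := (show abiInv _ from hI.frame.inv).2
  have hsse := Vorbis.sseOK_of_abiInv hI.frame.inv
  have hRA : g.RA = (g.e.reg .rsp).toNat := rfl
  have hn := hI.k1.ent_nonneg
  have hl := hI.k1.ent_lt
  have hsp : (v.reg .rsp).toNat = g.R := by
    rw [hI.frame.rsp]
    exact toNat_addr _ (by omega)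
  u_walk hcode [hμ.vendor] until [Vorbis.L.start_decoder.loop8] span [Vorbis.L.textLo, Vorbis.L.textHi] side (v_side)
  -- 0x114536, the head of loop 3776 again
  have hinv : (conv u₀).inv s_114533 := by v_inv
  have hs : Mem.SameExcept (C3.stepWins g.R g.f (Codebook.codeword_lengths v.mem (g.cb v.mem i)) ce ce)
      v.mem s_114533.mem := by
    rw [w_mem]
    exact Mem.SameExcept.refl _ _
  have hbits : Bits (g.Blk A) g.len s_114533.mem g.f := by
    rw [w_mem]
    exact hI.cur.sd.bits
  have hIr := hI.carry (pc' := Vorbis.L.start_decoder.loop8) w_rip (w_kept.get .rsp rfl) (w_kept.get .r14 rfl)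
    (w_kept.get .rbx rfl) hinv hs (Nat.le_refl _) (Nat.le_refl _) (by omega) hbits
  have ebp : (s_114533.reg .rbp).toNat = ce := by
    rw [w_rbp, Vorbis.toNat_ofBV32, Asan.part32_toNat]
    have e : (UInt64.ofNat ce).toNat = ce := toNat_addr _ (by omega)
    rw [e]
    omega
  have e12 : (s_114533.reg .r12).toNat = (v.reg .r12).toNat + 1 := by
    rw [w_r12, Vorbis.toNat_ofBV32, BitVec.toNat_add, Asan.part32_toNat]
    have e1 : (1#32 : BitVec 32).toNat = 1 := rfl
    rw [e1]
    omega
  refine ReachVia.done ⟨?_, e12, ?_⟩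
  · rw [ebp]
    exact hIr
  · rw [ebp, w_mem]
    exact hle

end Vorbis.Spec.start_decoder_C3b
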